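-- pv_equiv track=rewrite | github.com/dennisshushackwork/MSrag | chunkers/recursivechunker.py | split_by_separator
-- ===== SOURCE A (Python) =====
-- from typing import List, Tuple
--
-- def split_by_separator(text: str, separator: str) -> List[str]:
--     """Split text using separator while preserving the separator and natural boundaries."""
--     if not text or not text.strip():
--         return []
--
--     # Handle character-level splitting
--     if separator == "":
--         return list(text)
--
--     # If separator not in text, return the whole text
--     if separator not in text:
--         return [text]
--
--     # Split and preserve separators
--     parts = text.split(separator)
--     results = []
--
--     for i, part in enumerate(parts):
--         if i == len(parts) - 1:
--             # Last part - no separator to add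
--             if part:
--                 results.append(part)
--         else:
--             # Add separator back to maintain original text structure
--             if part or separator.strip():  # Keep empty parts if separator has meaning
--                 results.append(part + separator)
--
--     # Filter out completely empty results
--     return [r for r in results if r]
-- ===== SOURCE B (Python) =====
-- def split_by_separator(text: str, separator: str):
--     """Split text using separator while preserving the separator (scanning rewrite)."""
--     if not text or not text.strip():
--         return []
--     if separator == "":
--         return list(text)
--     if separator not in text:
--         return [text]
--     out = []
--     rest = text
--     while True:
--         idx = rest.find(separator)
--         if idx == -1:
--             break
--         part = rest[:idx]
--         if part or separator.strip():
--             out.append(part + separator)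
--         rest = rest[idx + len(separator):]
--     if rest:
--         out.append(rest)
--     return out
-- ===== Notes on version B (the rewrite author's own statement) =====
-- stated objective: alternative
-- what changed: Replaced A's split-then-enumerate-then-filter pipeline (build all parts with str.split, loop over enumerate with an i==len-1 last-part test, then a final emptiness filter) by a single find-driven scan that walks the remaining suffix, emitting part+separator at each occurrence and the trailing remainder at the end, with no enumerate index and no final filter.
import Mathlib
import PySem

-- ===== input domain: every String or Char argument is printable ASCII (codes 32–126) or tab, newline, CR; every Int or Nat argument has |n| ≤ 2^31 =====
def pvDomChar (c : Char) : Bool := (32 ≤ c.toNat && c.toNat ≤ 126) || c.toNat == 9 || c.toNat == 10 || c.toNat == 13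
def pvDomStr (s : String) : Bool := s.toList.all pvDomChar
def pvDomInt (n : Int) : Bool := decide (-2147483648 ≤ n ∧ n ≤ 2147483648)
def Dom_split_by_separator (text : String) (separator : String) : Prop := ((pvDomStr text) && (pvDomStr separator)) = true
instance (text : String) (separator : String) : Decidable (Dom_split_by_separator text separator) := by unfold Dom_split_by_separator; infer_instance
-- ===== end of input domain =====

-- B replaces A's split/enumerate/filter pipeline by a single find-driven scan over the
-- remaining suffix (objective: alternative decomposition; same cost).

-- ===== PORT A =====
-- the for-loop over enumerate(parts): 'i == len(parts)-1' is exactly the singleton-tail case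
def splitA_go (sep : List Char) : List (List Char) → List (List Char)
  | [] => []
  | [part] => if !part.isEmpty then [part] else []
  | part :: rest => (if !part.isEmpty || !(PySem.Chars.strip sep).isEmpty then [part ++ sep] else []) ++ splitA_go sep rest

def split_by_separator (text : String) (separator : String) : List String :=
  if text.toList.isEmpty || (PySem.Chars.strip text.toList).isEmpty then []
  else if separator.toList.isEmpty then text.toList.map (fun c => String.ofList [c])
  else if !(PySem.Chars.isIn separator.toList text.toList) then [text]
  else
    let parts := PySem.Chars.splitOn text.toList separator.toList
    let results := splitA_go separator.toList parts
    (results.filter (fun r => !r.isEmpty)).map String.ofList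

-- ===== PORT B =====
-- the while-loop of Source B: rest is text[pos:], idx = rest.find(separator)
def splitB_go (sep : List Char) (hsep : sep ≠ []) (rest : List Char) : List String :=
  let i := PySem.Chars.find rest sep
  if h : i ≠ -1 then
    let part := rest.take i.toNat
    (if !part.isEmpty || !(PySem.Chars.strip sep).isEmpty then [String.ofList (part ++ sep)] else []) ++
      splitB_go sep hsep (rest.drop (i.toNat + sep.length))
  else if rest.isEmpty then [] else [String.ofList rest]
termination_by rest.length
decreasing_by
  have h0 : 0 ≤ PySem.Chars.find rest sep := by
    have := PySem.Chars.neg_one_le_find (s := rest) (sub := sep); omega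
  have hpre := (PySem.Chars.find_spec (s := rest) (sub := sep) h0).1
  have hlen := hpre.length_le
  have hs : 1 ≤ sep.length := by
    cases sep with | nil => exact absurd rfl hsep | cons a t => simp
  simp only [List.length_drop] at *
  omega

def split_by_separator_alt (text : String) (separator : String) : List String :=
  if text.toList.isEmpty || (PySem.Chars.strip text.toList).isEmpty then []
  else if h : separator.toList.isEmpty then text.toList.map (fun c => String.ofList [c])
  else if !(PySem.Chars.isIn separator.toList text.toList) then [text]
  else splitB_go separator.toList (by simpa using h) text.toList

-- ===== PRECONDITION & SPEC =====
def Spec_split_by_separator (text : String) (separator : String) (out : List String) : Prop := out = split_by_separator_alt text separator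
instance (text : String) (separator : String) (out : List String) : Decidable (Spec_split_by_separator text separator out) := by unfold Spec_split_by_separator; infer_instance

-- ===== CLAIM (what is proved, stated in full; the proofs are below) =====
def Claim_equal_split_by_separator : Prop := ∀ (text : String) (separator : String), Dom_split_by_separator text separator → Spec_split_by_separator text separator (split_by_separator text separator)

-- ===== LEMMAS AND PROOFS =====

-- shift lemma for find.go's position counter
theorem findgo_shift (sub l : List Char) (k : Nat) :
    PySem.Chars.find.go sub l k =
      if PySem.Chars.find l sub = -1 then -1 else PySem.Chars.find l sub + k := by
  induction l generalizing k with
  | nil =>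
    simp only [PySem.Chars.find, PySem.Chars.find.go]
    split <;> simp
  | cons c t ih =>
    rw [PySem.Chars.find.go.eq_def]
    simp only
    split
    · next hp =>
      have : PySem.Chars.find (c :: t) sub = 0 := by
        simp [PySem.Chars.find, PySem.Chars.find.go, hp]
      simp [this]
    · next hp =>
      have hfind : PySem.Chars.find (c :: t) sub = PySem.Chars.find.go sub t 1 := by
        simp [PySem.Chars.find, PySem.Chars.find.go, hp]
      rw [ih (k+1), hfind, ih 1]
      have hge := PySem.Chars.neg_one_le_find (s := t) (sub := sub)
      split_ifs with h1 h2 h3 <;> push_cast <;> omega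

theorem find_of_prefix (sep l : List Char) (h : sep.isPrefixOf l) :
    PySem.Chars.find l sep = 0 := by
  cases l with
  | nil =>
    have : sep.isEmpty := by cases sep <;> simp_all [List.isPrefixOf]
    simp [PySem.Chars.find, PySem.Chars.find.go, this]
  | cons c t => simp [PySem.Chars.find, PySem.Chars.find.go, h]

theorem find_cons (sep : List Char) (c : Char) (t : List Char) (h : ¬ sep.isPrefixOf (c :: t) = true) :
    PySem.Chars.find (c :: t) sep =
      if PySem.Chars.find t sep = -1 then -1 else PySem.Chars.find t sep + 1 := by
  have : PySem.Chars.find (c :: t) sep = PySem.Chars.find.go sep t 1 := by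
    simp [PySem.Chars.find, PySem.Chars.find.go, h]
  rw [this, findgo_shift]
  norm_num

theorem find_nil_of_ne (sep : List Char) (hsep : sep ≠ []) : PySem.Chars.find [] sep = -1 := by
  have : ¬ sep.isEmpty := by cases sep <;> simp_all
  simp [PySem.Chars.find, PySem.Chars.find.go, this]

-- a structural model of Python's str.split(sep): cut at the first occurrence, recurse
def mySplit (sep : List Char) (hsep : sep ≠ []) (s : List Char) : List (List Char) :=
  let i := PySem.Chars.find s sep
  if h : i ≠ -1 then s.take i.toNat :: mySplit sep hsep (s.drop (i.toNat + sep.length))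
  else [s]
termination_by s.length
decreasing_by
  have h0 : 0 ≤ PySem.Chars.find s sep := by
    have := PySem.Chars.neg_one_le_find (s := s) (sub := sep); omega
  have hpre := (PySem.Chars.find_spec (s := s) (sub := sep) h0).1
  have hlen := hpre.length_le
  have hs : 1 ≤ sep.length := by
    cases sep with | nil => exact absurd rfl hsep | cons a t => simp
  simp only [List.length_drop] at *
  omega

theorem mySplit_ne_nil (sep : List Char) (hsep : sep ≠ []) (s : List Char) :
    mySplit sep hsep s ≠ [] := by
  rw [mySplit]; split <;> simp

-- accumulator-free model of PySem.Chars.splitOn.go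
def model (sep : List Char) : Nat → List Char → List Char → List (List Char)
  | 0, l, cur => [cur.reverse ++ l]
  | _ + 1, [], cur => [cur.reverse]
  | fuel + 1, c :: rest, cur =>
      if sep.isPrefixOf (c :: rest) then cur.reverse :: model sep fuel ((c :: rest).drop sep.length) []
      else model sep fuel rest (c :: cur)

theorem go_eq_model (sep : List Char) (fuel : Nat) (l cur : List Char) (acc : List (List Char)) :
    PySem.Chars.splitOn.go sep fuel l cur acc = acc.reverse ++ model sep fuel l cur := by
  induction fuel generalizing l cur acc with
  | zero => rw [PySem.Chars.splitOn.go.eq_def]; simp [model]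
  | succ f ih =>
    cases l with
    | nil => rw [PySem.Chars.splitOn.go.eq_def]; simp [model]
    | cons c rest =>
      rw [PySem.Chars.splitOn.go.eq_def]
      simp only [model]
      split
      · next hp => rw [ih]; simp
      · next hp => rw [ih]

theorem model_eq_mySplit (sep : List Char) (hsep : sep ≠ []) (fuel : Nat) (l cur : List Char)
    (hf : l.length < fuel) :
    model sep fuel l cur = (mySplit sep hsep l).modifyHead (cur.reverse ++ ·) := by
  induction fuel generalizing l cur with
  | zero => omega
  | succ f ih =>
    cases l with
    | nil =>
      rw [mySplit]
      simp [model, find_nil_of_ne sep hsep]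
    | cons c rest =>
      simp only [model]
      split
      · next hp =>
        have hfind : PySem.Chars.find (c :: rest) sep = 0 := find_of_prefix sep _ hp
        have hlsep : 1 ≤ sep.length := by
          cases sep with | nil => exact absurd rfl hsep | cons a t => simp
        rw [mySplit]
        simp only [hfind]
        norm_num
        rw [ih _ [] (by simp only [List.length_drop, List.length_cons] at hf ⊢; omega)]
        obtain ⟨h, t, he⟩ : ∃ h t, mySplit sep hsep ((c :: rest).drop sep.length) = h :: t := by
          rcases e : mySplit sep hsep ((c :: rest).drop sep.length) with _ | ⟨h, t⟩
          · exact absurd e (mySplit_ne_nil _ _ _)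
          · exact ⟨_, _, rfl⟩
        rw [he]; simp
      · next hp =>
        rw [ih _ (c :: cur) (by simp at hf ⊢; omega)]
        have hc := find_cons sep c rest hp
        have hge := PySem.Chars.neg_one_le_find (s := rest) (sub := sep)
        by_cases hr : PySem.Chars.find rest sep = -1
        · conv_lhs => rw [mySplit]
          conv_rhs => rw [mySplit]
          simp [hc, hr]
        · have h0 : 0 ≤ PySem.Chars.find rest sep := by omega
          obtain ⟨n, hn⟩ : ∃ n : Nat, PySem.Chars.find rest sep = n :=
            ⟨(PySem.Chars.find rest sep).toNat, (Int.toNat_of_nonneg h0).symm⟩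
          have hfind : PySem.Chars.find (c :: rest) sep = (n : Int) + 1 := by
            rw [hc]; simp [hn]
          conv_lhs => rw [mySplit]
          conv_rhs => rw [mySplit]
          simp only [hfind, hn]
          have h1 : ((n : Int) + 1) ≠ -1 := by omega
          have h2 : ((n : Int) + 1).toNat = n + 1 := by omega
          have h3 : ((n : Int)).toNat = n := by omega
          simp [h1, h2, h3]
          rw [show n + 1 + sep.length = (n + sep.length) + 1 from by omega, List.drop_succ_cons]

theorem splitOn_eq_mySplit (sep : List Char) (hsep : sep ≠ []) (s : List Char) :
    PySem.Chars.splitOn s sep = mySplit sep hsep s := by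
  have h1 : PySem.Chars.splitOn s sep = model sep (s.length + 1) s [] := by
    have := go_eq_model sep (s.length + 1) s [] []
    simpa [PySem.Chars.splitOn] using this
  rw [h1, model_eq_mySplit sep hsep _ _ _ (by omega)]
  obtain ⟨r, t, he⟩ : ∃ r t, mySplit sep hsep s = r :: t := by
    rcases e : mySplit sep hsep s with _ | ⟨r, t⟩
    · exact absurd e (mySplit_ne_nil _ _ _)
    · exact ⟨_, _, rfl⟩
  rw [he]; simp

theorem core_eq (sep : List Char) (hsep : sep ≠ []) (s : List Char) :
    ((splitA_go sep (mySplit sep hsep s)).filter (fun r => !r.isEmpty)).map String.ofList =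
      splitB_go sep hsep s := by
  fun_induction splitB_go sep hsep s with
  | case1 rest i h part ih =>
    rw [mySplit]
    rw [dif_pos (by exact h)]
    obtain ⟨r, t, he⟩ : ∃ r t, mySplit sep hsep (rest.drop (i.toNat + sep.length)) = r :: t := by
      rcases e : mySplit sep hsep (rest.drop (i.toNat + sep.length)) with _ | ⟨r, t⟩
      · exact absurd e (mySplit_ne_nil _ _ _)
      · exact ⟨_, _, rfl⟩
    rw [he]
    rw [he] at ih
    simp only [splitA_go]
    have hne : ((rest.take (PySem.Chars.find rest sep).toNat ++ sep).isEmpty) = false := by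
      cases sep with | nil => exact absurd rfl hsep | cons a t => simp
    rw [List.filter_append, List.map_append, ih]
    congr 1
    split
    · rw [show List.filter (fun r => !r.isEmpty) [List.take (PySem.Chars.find rest sep).toNat rest ++ sep] = [List.take (PySem.Chars.find rest sep).toNat rest ++ sep] from by simp only [List.filter_cons, List.filter_nil, hne, Bool.not_false, if_true]]
      rfl
    · rfl
  | case2 rest i h he =>
    rw [mySplit]
    rw [dif_neg (by exact h)]
    simp [splitA_go, he]
  | case3 rest i h he =>
    rw [mySplit]
    rw [dif_neg (by exact h)]
    simp [splitA_go, he]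

-- ===== VERDICT (by name: the statement is the Claim_ definition above) =====
theorem split_by_separator_spec : Claim_equal_split_by_separator := by
  intro text separator _
  unfold Spec_split_by_separator split_by_separator split_by_separator_alt
  split
  · rfl
  · split
    · rfl
    · next h =>
      split
      · rfl
      · have hsep : separator.toList ≠ [] := by simpa using h
        simp only [splitOn_eq_mySplit separator.toList hsep]
        exact core_eq separator.toList hsep text.toList
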